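-- pv_equiv track=rewrite | github.com/TrivicM/FinTrack | FinTrack/07_AI_categorisation/gen_cat_eval.py | match_transactions
-- ===== SOURCE A (Python) =====
-- def match_transactions(transactions, keyword_to_category):
--     """
--     Matches transactions to categories based on provided keywords.
--
--     Args:
--         transactions (list of dict): A list of transaction dictionaries. Each transaction may contain the keys
--             'sender_receiver', 'booking_text', and 'purpose'.
--         keyword_to_category (dict): A dictionary mapping keywords (str) to sets or lists of categories.
--
--     Returns:
--         tuple:
--             matched_categories (list): A list of categories matched from the transactions.
--             unmatched (list): A list of transaction dictionaries that did not match any keyword.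
--     """
--     unmatched = []
--     matched_categories = []
--     for tx in transactions:
--         text = f"{tx.get('sender_receiver','')} {tx.get('booking_text','')} {tx.get('purpose','')}".lower()
--         found = False
--         for kw, cats in keyword_to_category.items():
--             if kw and kw in text:
--                 matched_categories.extend(list(cats))
--                 found = True
--                 break
--         if not found:
--             unmatched.append(tx)
--     return matched_categories, unmatched
-- ===== SOURCE B (Python) =====
-- def match_transactions(transactions, keyword_to_category):
--     # Keyword-major sieve: precompute each transaction's search text once, then
--     # process keywords one at a time, sieving matched transactions out of the
--     # unmatched pool and stopping as soon as the pool is empty.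
--     texts = [f"{tx.get('sender_receiver','')} {tx.get('booking_text','')} {tx.get('purpose','')}".lower()
--              for tx in transactions]
--     result = [None] * len(transactions)
--     remaining = list(range(len(transactions)))
--     for kw, cats in keyword_to_category.items():
--         if not kw:
--             continue
--         still = []
--         for i in remaining:
--             if kw in texts[i]:
--                 result[i] = list(cats)
--             else:
--                 still.append(i)
--         remaining = still
--         if not remaining:
--             break
--     matched_categories = [c for cats in result if cats is not None for c in cats]
--     unmatched = [transactions[i] for i in remaining]
--     return matched_categories, unmatched
-- ===== Notes on version B (the rewrite author's own statement) =====
-- stated objective: alternative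
-- what changed: Inverts the loop nesting: instead of scanning the keyword dict afresh for every transaction and breaking at the first hit, B precomputes every transaction's search text once, then walks the keywords once, sieving matched transactions out of a shrinking unmatched index pool (stopping when it is empty) and assembling the outputs from the recorded per-transaction categories at the end.
import Mathlib
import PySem

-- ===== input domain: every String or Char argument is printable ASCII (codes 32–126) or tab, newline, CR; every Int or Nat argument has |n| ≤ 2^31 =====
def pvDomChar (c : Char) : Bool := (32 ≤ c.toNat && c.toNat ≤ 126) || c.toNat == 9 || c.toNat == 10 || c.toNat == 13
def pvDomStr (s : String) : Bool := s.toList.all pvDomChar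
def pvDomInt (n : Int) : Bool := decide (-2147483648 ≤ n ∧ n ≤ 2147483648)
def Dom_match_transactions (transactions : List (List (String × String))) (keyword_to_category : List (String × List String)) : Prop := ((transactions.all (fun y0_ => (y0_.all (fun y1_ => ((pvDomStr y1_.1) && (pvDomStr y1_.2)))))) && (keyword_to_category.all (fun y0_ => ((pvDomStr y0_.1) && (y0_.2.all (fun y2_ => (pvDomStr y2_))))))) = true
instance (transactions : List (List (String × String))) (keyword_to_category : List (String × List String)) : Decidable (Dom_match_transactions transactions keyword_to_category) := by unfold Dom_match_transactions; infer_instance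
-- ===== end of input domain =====

-- B inverts the loop nesting: texts are precomputed once and keywords are processed one at a
-- time, sieving matched transactions out of a shrinking unmatched pool; objective: alternative.

-- shared helper: both Pythons build the very same lowered text line
def pvText (tx : List (String × String)) : List Char :=
  PySem.Chars.lower
    ((PySem.Dict.getD (PySem.Dict.mk tx) "sender_receiver" "").toList ++ ' ' ::
     (PySem.Dict.getD (PySem.Dict.mk tx) "booking_text" "").toList ++ ' ' ::
     (PySem.Dict.getD (PySem.Dict.mk tx) "purpose" "").toList)

-- ===== PORT A =====
-- A's inner `for kw, cats … if kw and kw in text: …; break` as an Option-returning scan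
def pvFindCatsA (text : List Char) : List (String × List String) → Option (List String)
  | [] => none
  | (kw, cats) :: rest =>
    if (!kw.toList.isEmpty) && PySem.Chars.isIn kw.toList text then some cats
    else pvFindCatsA text rest

def match_transactions (transactions : List (List (String × String))) (keyword_to_category : List (String × List String)) : List String × (List (List (String × String))) :=
  transactions.foldl (fun acc tx =>
    match pvFindCatsA (pvText tx) keyword_to_category with
    | some cats => (acc.1 ++ cats, acc.2)          -- found = True; matched_categories.extend(list(cats))
    | none => (acc.1, acc.2 ++ [tx]))              -- unmatched.append(tx)
    ([], [])

-- ===== PORT B =====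
-- `texts[i]` (index always valid: i comes from range(len(transactions)))
def pvTextAt (texts : List (List Char)) (i : Nat) : List Char := texts.getD i []

-- the inner `for i in remaining: …` loop of one keyword: sieve the pool, record hits in result
def pvSieveKw (kw : List Char) (cats : List String) (texts : List (List Char)) :
    List Nat → List (Option (List String)) → List Nat × List (Option (List String))
  | [], result => ([], result)
  | i :: rest, result =>
    if PySem.Chars.isIn kw (pvTextAt texts i) then
      pvSieveKw kw cats texts rest (result.set i (some cats))   -- result[i] = list(cats)
    else
      (i :: (pvSieveKw kw cats texts rest result).1,
       (pvSieveKw kw cats texts rest result).2)                 -- still.append(i)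

-- the outer `for kw, cats in keyword_to_category.items(): …` loop
def pvSieveAll (texts : List (List Char)) :
    List (String × List String) → List Nat → List (Option (List String)) → List Nat × List (Option (List String))
  | [], remaining, result => (remaining, result)
  | (kw, cats) :: rest, remaining, result =>
    if kw.toList.isEmpty then pvSieveAll texts rest remaining result      -- if not kw: continue
    else
      let (r', res') := pvSieveKw kw.toList cats texts remaining result
      if r'.isEmpty then (r', res')                                       -- if not remaining: break
      else pvSieveAll texts rest r' res'

def match_transactions_alt (transactions : List (List (String × String))) (keyword_to_category : List (String × List String)) : List String × (List (List (String × String))) :=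
  let texts := transactions.map pvText
  let p := pvSieveAll texts keyword_to_category (List.range transactions.length) (List.replicate transactions.length none)
  (p.2.flatMap (fun cats => cats.getD []),               -- [c for cats in result if cats is not None for c in cats]
   p.1.filterMap (fun i => transactions[i]?))            -- [transactions[i] for i in remaining]

-- ===== PRECONDITION & SPEC =====
def Spec_match_transactions (transactions : List (List (String × String))) (keyword_to_category : List (String × List String)) (out : List String × (List (List (String × String)))) : Prop := out = match_transactions_alt transactions keyword_to_category
instance (transactions : List (List (String × String))) (keyword_to_category : List (String × List String)) (out : List String × (List (List (String × String)))) : Decidable (Spec_match_transactions transactions keyword_to_category out) := by unfold Spec_match_transactions; infer_instance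

-- ===== CLAIM (what is proved, stated in full; the proofs are below) =====
def Claim_equal_match_transactions : Prop := ∀ (transactions : List (List (String × String))) (keyword_to_category : List (String × List String)), Dom_match_transactions transactions keyword_to_category → Spec_match_transactions transactions keyword_to_category (match_transactions transactions keyword_to_category)

-- ===== LEMMAS AND PROOFS =====

-- A's fold, with the accumulator generalized
theorem matchA_eq (txs : List (List (String × String))) (ktc : List (String × List String)) :
    match_transactions txs ktc =
      (txs.flatMap (fun tx => (pvFindCatsA (pvText tx) ktc).getD []),
       txs.filter (fun tx => (pvFindCatsA (pvText tx) ktc).isNone)) := by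
  have h : ∀ (l : List (List (String × String))) (m : List String) (u : List (List (String × String))),
      l.foldl (fun acc tx =>
        match pvFindCatsA (pvText tx) ktc with
        | some cats => (acc.1 ++ cats, acc.2)
        | none => (acc.1, acc.2 ++ [tx])) (m, u) =
      (m ++ l.flatMap (fun tx => (pvFindCatsA (pvText tx) ktc).getD []),
       u ++ l.filter (fun tx => (pvFindCatsA (pvText tx) ktc).isNone)) := by
    intro l
    induction l with
    | nil => simp
    | cons tx t ih =>
      intro m u
      cases hc : pvFindCatsA (pvText tx) ktc <;>
        simp [List.foldl_cons, hc, ih]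
  simpa using h txs [] []

theorem sieveKw_length (kw : List Char) (cats : List String) (texts : List (List Char))
    (rem : List Nat) (res : List (Option (List String))) :
    (pvSieveKw kw cats texts rem res).2.length = res.length := by
  induction rem generalizing res with
  | nil => simp [pvSieveKw]
  | cons i rest ih =>
    by_cases hc : PySem.Chars.isIn kw (pvTextAt texts i)
    · rw [pvSieveKw, if_pos hc]; simp [ih]
    · rw [pvSieveKw, if_neg hc]; simp [ih]

theorem sieveKw_fst (kw : List Char) (cats : List String) (texts : List (List Char))
    (rem : List Nat) (res : List (Option (List String))) :
    (pvSieveKw kw cats texts rem res).1 =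
      rem.filter (fun i => !PySem.Chars.isIn kw (pvTextAt texts i)) := by
  induction rem generalizing res with
  | nil => simp [pvSieveKw]
  | cons i rest ih =>
    by_cases hc : PySem.Chars.isIn kw (pvTextAt texts i)
    · rw [pvSieveKw, if_pos hc, List.filter_cons]; simp [hc, ih]
    · rw [pvSieveKw, if_neg hc, List.filter_cons]; simp [hc, ih]

theorem sieveKw_snd (kw : List Char) (cats : List String) (texts : List (List Char))
    (rem : List Nat) (res : List (Option (List String)))
    (hlt : ∀ i ∈ rem, i < res.length) (j : Nat) :
    (pvSieveKw kw cats texts rem res).2[j]? =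
      if j ∈ rem ∧ PySem.Chars.isIn kw (pvTextAt texts j) then some (some cats) else res[j]? := by
  induction rem generalizing res with
  | nil => simp [pvSieveKw]
  | cons i rest ih =>
    have hi : i < res.length := hlt i (by simp)
    by_cases hc : PySem.Chars.isIn kw (pvTextAt texts i)
    · rw [pvSieveKw, if_pos hc,
        ih (res.set i (some cats)) (by simpa using fun a ha => hlt a (List.mem_cons_of_mem _ ha))]
      by_cases hjr : j ∈ rest ∧ PySem.Chars.isIn kw (pvTextAt texts j)
      · simp [hjr]
      · rw [if_neg hjr]
        by_cases hji : j = i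
        · subst hji
          simp [hc, hi]
        · rw [List.getElem?_set_ne (by omega)]
          rw [if_neg (by rintro ⟨hm, hin⟩; rcases List.mem_cons.mp hm with h | h
                         · exact hji h
                         · exact hjr ⟨h, hin⟩)]
    · rw [pvSieveKw, if_neg hc]
      have := ih res (fun a ha => hlt a (List.mem_cons_of_mem _ ha))
      simp only []
      rw [this]
      by_cases hji : j = i
      · subst hji
        simp [hc]
      · by_cases hjr : j ∈ rest ∧ PySem.Chars.isIn kw (pvTextAt texts j)
        · rw [if_pos hjr, if_pos ⟨List.mem_cons_of_mem _ hjr.1, hjr.2⟩]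
        · rw [if_neg hjr]
          rw [if_neg (by rintro ⟨hm, hin⟩; rcases List.mem_cons.mp hm with h | h
                         · exact hc (h ▸ hin)
                         · exact hjr ⟨h, hin⟩)]

theorem sieveAll_spec (texts : List (List Char)) (ktc : List (String × List String))
    (rem : List Nat) (res : List (Option (List String)))
    (hlt : ∀ i ∈ rem, i < res.length) :
    (pvSieveAll texts ktc rem res).1 =
        rem.filter (fun i => (pvFindCatsA (pvTextAt texts i) ktc).isNone) ∧
    ∀ j, (pvSieveAll texts ktc rem res).2[j]? =
      if j ∈ rem ∧ (pvFindCatsA (pvTextAt texts j) ktc).isSome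
      then (pvFindCatsA (pvTextAt texts j) ktc).map some else res[j]? := by
  induction ktc generalizing rem res with
  | nil =>
    constructor
    · simp [pvSieveAll, pvFindCatsA]
    · intro j; simp [pvSieveAll, pvFindCatsA]
  | cons q rest ih =>
    obtain ⟨kw, cats⟩ := q
    by_cases he : kw.toList.isEmpty
    · have hA : ∀ t, pvFindCatsA t ((kw, cats) :: rest) = pvFindCatsA t rest := by
        intro t; simp [pvFindCatsA, he]
      rw [pvSieveAll, if_pos he]
      obtain ⟨h1, h2⟩ := ih rem res hlt
      exact ⟨by rw [h1]; simp [hA], fun j => by rw [h2 j]; simp [hA]⟩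
    · rw [pvSieveAll, if_neg he]
      have hfst := sieveKw_fst kw.toList cats texts rem res
      have hsnd := sieveKw_snd kw.toList cats texts rem res hlt
      have hAeq : ∀ t, pvFindCatsA t ((kw, cats) :: rest) =
          if PySem.Chars.isIn kw.toList t then some cats else pvFindCatsA t rest := by
        intro t; simp [pvFindCatsA, he]
      by_cases hbr : (pvSieveKw kw.toList cats texts rem res).1.isEmpty
      · -- break: every index of the pool matched this keyword
        simp only [hbr, if_true]
        have hall : ∀ i ∈ rem, PySem.Chars.isIn kw.toList (pvTextAt texts i) = true := by
          intro i hirem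
          by_contra hni
          have : i ∈ (pvSieveKw kw.toList cats texts rem res).1 := by
            rw [hfst]; exact List.mem_filter.mpr ⟨hirem, by simpa using hni⟩
          rw [List.isEmpty_iff.mp hbr] at this
          simp at this
      
        constructor
        · rw [List.isEmpty_iff.mp hbr, eq_comm, List.filter_eq_nil_iff]
          intro i hirem
          rw [hAeq, if_pos (hall i hirem)]
          simp
        · intro j
          rw [hsnd j]
          by_cases hj : j ∈ rem
          · rw [if_pos ⟨hj, hall j hj⟩, if_pos (by rw [hAeq, if_pos (hall j hj)]; exact ⟨hj, rfl⟩),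
              hAeq, if_pos (hall j hj)]
            rfl
          · rw [if_neg (by rintro ⟨h, -⟩; exact hj h), if_neg (by rintro ⟨h, -⟩; exact hj h)]
      · rw [Bool.not_eq_true] at hbr
        simp only [hbr, Bool.false_eq_true, if_false]
        have hlt' : ∀ i ∈ (pvSieveKw kw.toList cats texts rem res).1,
            i < (pvSieveKw kw.toList cats texts rem res).2.length := by
          intro i hi
          rw [sieveKw_length]
          rw [hfst] at hi
          exact hlt i (List.mem_filter.mp hi).1
        obtain ⟨h1, h2⟩ := ih _ _ hlt'
        constructor
        · rw [h1, hfst, List.filter_filter]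
          apply List.filter_congr
          intro i _
          rw [hAeq]
          by_cases hc : PySem.Chars.isIn kw.toList (pvTextAt texts i) <;> simp [hc]
        · intro j
          rw [h2 j, hsnd j, hfst]
          simp only [hAeq]
          by_cases hj : j ∈ rem
          · by_cases hc : PySem.Chars.isIn kw.toList (pvTextAt texts j)
            · have hnf : j ∉ rem.filter (fun i => !PySem.Chars.isIn kw.toList (pvTextAt texts i)) := by
                simp [List.mem_filter, hc]
              simp [hc, hj, hnf]
            · have hjf : j ∈ rem.filter (fun i => !PySem.Chars.isIn kw.toList (pvTextAt texts i)) := by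
                simp [List.mem_filter, hj, hc]
              simp [hc, hj, hjf]
          · have hnf : j ∉ rem.filter (fun i => !PySem.Chars.isIn kw.toList (pvTextAt texts i)) := by
              simp [List.mem_filter, hj]
            simp [hj, hnf]

-- the result list of the sieve is exactly the per-transaction first-match table
theorem sieve_result_eq (txs : List (List (String × String))) (ktc : List (String × List String)) :
    (pvSieveAll (txs.map pvText) ktc (List.range txs.length)
        (List.replicate txs.length none)).2 =
      txs.map (fun tx => pvFindCatsA (pvText tx) ktc) := by
  have hlt : ∀ i ∈ List.range txs.length, i < (List.replicate txs.length (none : Option (List String))).length := by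
    simp
  obtain ⟨-, h2⟩ := sieveAll_spec (txs.map pvText) ktc (List.range txs.length)
    (List.replicate txs.length none) hlt
  apply List.ext_getElem?
  intro j
  rw [h2 j]
  by_cases hj : j < txs.length
  · have htx : pvTextAt (txs.map pvText) j = pvText txs[j] := by
      simp only [pvTextAt]
      rw [List.getD_eq_getElem?_getD, List.getElem?_map, List.getElem?_eq_getElem hj]
      rfl
    rw [List.getElem?_map, List.getElem?_eq_getElem hj]
    by_cases hs : (pvFindCatsA (pvText txs[j]) ktc).isSome
    · rw [if_pos ⟨by simpa using hj, by rw [htx]; exact hs⟩, htx]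
      obtain ⟨c, hc⟩ := Option.isSome_iff_exists.mp hs
      simp [hc]
    · rw [if_neg (by rintro ⟨-, h⟩; rw [htx] at h; exact hs h)]
      have : pvFindCatsA (pvText txs[j]) ktc = none := by
        cases hx : pvFindCatsA (pvText txs[j]) ktc
        · rfl
        · exact absurd (by simp [hx]) hs
      simp [this, hj]
  · rw [if_neg (by rintro ⟨h, -⟩; exact hj (by simpa using h))]
    have hge : txs.length ≤ j := Nat.le_of_not_lt hj
    rw [List.getElem?_eq_none (by simpa using hge), List.getElem?_eq_none (by simpa using hge)]

-- picking `xs[i]` for the filtered indices i is filtering xs itself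
theorem range_filter_pick {α : Type} (xs : List α) (d : α) (p : α → Bool) :
    ((List.range xs.length).filter (fun i => p (xs.getD i d))).filterMap
        (fun i => xs[i]?) = xs.filter p := by
  rw [List.filterMap_filter]
  induction xs with
  | nil => simp
  | cons a t ih =>
    simp only [List.length_cons, List.range_succ_eq_map, List.filterMap_cons, List.filterMap_map,
      Function.comp_def, Nat.succ_eq_add_one, List.getD_cons_succ, List.getElem?_cons_succ,
      List.getD_cons_zero, List.getElem?_cons_zero]
    rw [ih, List.filter_cons]
    by_cases hp : p a <;> simp [hp]

-- ===== VERDICT (by name: the statement is the Claim_ definition above) =====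
theorem match_transactions_spec : Claim_equal_match_transactions := by
  intro txs ktc _
  unfold Spec_match_transactions
  rw [matchA_eq]
  unfold match_transactions_alt
  simp only []
  have hres := sieve_result_eq txs ktc
  have hrem := (sieveAll_spec (txs.map pvText) ktc (List.range txs.length)
      (List.replicate txs.length none) (by simp)).1
  rw [hres, hrem]
  refine Prod.ext ?_ ?_
  · rw [List.flatMap_map]
  · have hcg : ∀ i ∈ List.range txs.length,
        ((fun i => ((pvFindCatsA (pvTextAt (txs.map pvText) i) ktc).isNone : Bool)) i) =
        ((fun i => (((fun tx => ((pvFindCatsA (pvText tx) ktc).isNone : Bool)) ((txs.getD i []))) : Bool)) i) := by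
      intro i hi
      have hj : i < txs.length := by simpa using hi
      simp only []
      congr 2
      simp only [pvTextAt]
      rw [List.getD_eq_getElem?_getD, List.getElem?_map, List.getElem?_eq_getElem hj,
        List.getD_eq_getElem?_getD, List.getElem?_eq_getElem hj]
      rfl
    rw [List.filter_congr hcg]
    exact (range_filter_pick txs [] (fun tx => (pvFindCatsA (pvText tx) ktc).isNone)).symm
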